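-- pv_equiv track=rewrite | github.com/carnaticlabs/Sangeetha-Grantha | database/for_import/import_krithis.py | ordered_sections
-- ===== SOURCE A (Python) =====
-- CANONICAL_ORDER: list[str] = [
--     "pallavi",
--     "anupallavi",
--     "charanam",
--     "samashti_charanam",
--     "madhyamakala",
--     "chittaswaram",
--     "swara_sahitya",
--     "vilomam",
-- ]
--
-- def _normalise_section_key(key: str) -> str:
--     return key.lower().strip().replace(" ", "_").replace("-", "_")
--
-- def ordered_sections(sections: dict) -> list[tuple[str, str]]:
--     """Return (raw_key, text) pairs in canonical musical order."""
--     normalised = {_normalise_section_key(k): (k, v) for k, v in sections.items()}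
--     result: list[tuple[str, str]] = []
--     seen: set[str] = set()
--     for canonical_key in CANONICAL_ORDER:
--         if canonical_key in normalised:
--             raw_key, text = normalised[canonical_key]
--             result.append((raw_key, text))
--             seen.add(canonical_key)
--     for norm_key, (raw_key, text) in normalised.items():
--         if norm_key not in seen:
--             result.append((raw_key, text))
--     return result
-- ===== SOURCE B (Python) =====
-- CANONICAL_ORDER: list[str] = [
--     "pallavi",
--     "anupallavi",
--     "charanam",
--     "samashti_charanam",
--     "madhyamakala",
--     "chittaswaram",
--     "swara_sahitya",
--     "vilomam",
-- ]
--
-- def _normalise_section_key(key: str) -> str: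
--     return key.lower().strip().replace(" ", "_").replace("-", "_")
--
-- def ordered_sections(sections: dict) -> list[tuple[str, str]]:
--     """Return (raw_key, text) pairs in canonical musical order (bucket sort by rank)."""
--     normalised = {_normalise_section_key(k): (k, v) for k, v in sections.items()}
--     n = len(CANONICAL_ORDER)
--     rank = {key: i for i, key in enumerate(CANONICAL_ORDER)}
--     buckets: dict = {}
--     for norm_key, pair in normalised.items():
--         r = rank.get(norm_key, n)
--         buckets[r] = buckets.get(r, []) + [pair]
--     return [pair for r in range(n + 1) for pair in buckets.get(r, [])]
-- ===== Notes on version B (the rewrite author's own statement) =====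
-- stated objective: alternative
-- what changed: A's two phases (a scan of CANONICAL_ORDER probing the dict and collecting a seen-set, then a second pass over the dict skipping seen keys) are replaced by a single bucket-sort pass: a rank table is built once, each normalized item is appended to its rank bucket in one loop over the dict, and the buckets are concatenated in rank order.
import Mathlib
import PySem

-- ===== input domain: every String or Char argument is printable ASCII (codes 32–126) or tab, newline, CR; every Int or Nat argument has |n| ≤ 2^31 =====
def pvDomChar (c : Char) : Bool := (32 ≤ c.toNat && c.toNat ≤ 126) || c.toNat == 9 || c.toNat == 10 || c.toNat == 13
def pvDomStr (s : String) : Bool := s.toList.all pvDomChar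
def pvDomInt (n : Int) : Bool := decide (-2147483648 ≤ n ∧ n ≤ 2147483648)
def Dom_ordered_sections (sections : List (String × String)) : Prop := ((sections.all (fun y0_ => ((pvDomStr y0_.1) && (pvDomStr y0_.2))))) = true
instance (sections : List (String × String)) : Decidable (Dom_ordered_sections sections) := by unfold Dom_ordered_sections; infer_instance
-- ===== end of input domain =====

-- B replaces A's two phases (a scan of CANONICAL_ORDER with membership tests plus a seen-set
-- pass over the dict) by one bucket pass over the dict keyed by a rank table; objective: alternative.

-- ===== PORT A =====
def pvCanonicalOrder : List String :=
  ["pallavi", "anupallavi", "charanam", "samashti_charanam",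
   "madhyamakala", "chittaswaram", "swara_sahitya", "vilomam"]

def pvNormaliseSectionKey (key : String) : String :=
  PySem.Str.replace (PySem.Str.replace (PySem.Str.strip (PySem.Str.lower key)) " " "_") "-" "_"

def ordered_sections (sections : List (String × String)) : List (String × String) :=
  let normalised : PySem.Dict String (String × String) :=
    sections.foldl (fun d kv => d.insert (pvNormaliseSectionKey kv.1) (kv.1, kv.2)) PySem.Dict.empty
  -- first loop carries the (result, seen) pair; normalised[canonical_key] is guarded by the
  -- contains test, so the getD default is never consulted
  let step : List (String × String) × PySem.Set String :=
    pvCanonicalOrder.foldl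
      (fun acc c =>
        if normalised.contains c then
          (acc.1 ++ [normalised.getD c ("", "")], PySem.Set.add acc.2 c)
        else acc)
      ([], PySem.Set.empty)
  -- second loop: items whose normalised key was not seen, in insertion order
  normalised.items.foldl
    (fun res p => if PySem.Set.contains step.2 p.1 then res else res ++ [p.2]) step.1

-- ===== PORT B =====
-- rank = {key: i for i, key in enumerate(CANONICAL_ORDER)}
def pvRank : PySem.Dict String Int :=
  (PySem.List.enumerate pvCanonicalOrder).foldl (fun d p => d.insert p.2 p.1) PySem.Dict.empty

def ordered_sections_alt (sections : List (String × String)) : List (String × String) :=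
  let normalised : PySem.Dict String (String × String) :=
    sections.foldl (fun d kv => d.insert (pvNormaliseSectionKey kv.1) (kv.1, kv.2)) PySem.Dict.empty
  let n : Int := 8  -- n = len(CANONICAL_ORDER)
  -- buckets[r] = buckets.get(r, []) + [pair]
  let buckets : PySem.Dict Int (List (String × String)) :=
    normalised.items.foldl
      (fun b p => b.modify (pvRank.getD p.1 n) [] (· ++ [p.2])) PySem.Dict.empty
  (PySem.List.pyRange 0 (n + 1) 1).foldl (fun res r => res ++ buckets.getD r []) []

-- ===== PRECONDITION & SPEC =====
def Spec_ordered_sections (sections : List (String × String)) (out : List (String × String)) : Prop := out = ordered_sections_alt sections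
instance (sections : List (String × String)) (out : List (String × String)) : Decidable (Spec_ordered_sections sections out) := by unfold Spec_ordered_sections; infer_instance

-- ===== CLAIM (what is proved, stated in full; the proofs are below) =====
def Claim_equal_ordered_sections : Prop := ∀ (sections : List (String × String)), Dom_ordered_sections sections → Spec_ordered_sections sections (ordered_sections sections)

-- ===== LEMMAS AND PROOFS =====

-- pvRank.getD as an explicit decision chain over the eight canonical keys
set_option maxHeartbeats 1000000 in
theorem pvRank_getD (s : String) : pvRank.getD s 8 =
    if s = "pallavi" then 0 else if s = "anupallavi" then 1 else if s = "charanam" then 2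
    else if s = "samashti_charanam" then 3 else if s = "madhyamakala" then 4
    else if s = "chittaswaram" then 5 else if s = "swara_sahitya" then 6
    else if s = "vilomam" then 7 else 8 := by
  simp only [pvRank, pvCanonicalOrder, PySem.List.enumerate_cons, PySem.List.enumerate_nil,
    List.foldl_cons, List.foldl_nil]
  simp only [PySem.Dict.getD_insert, PySem.Dict.getD_empty]
  norm_num
  split_ifs <;> simp_all

-- A's first loop over a (result, seen) pair splits into two independent folds
theorem foldl_pair_split (l : List String) (P : String → Bool) (g : String → String × String)
    (r0 : List (String × String)) (s0 : PySem.Set String) :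
    l.foldl (fun acc c => if P c then (acc.1 ++ [g c], PySem.Set.add acc.2 c) else acc) (r0, s0)
    = (l.foldl (fun r c => if P c then r ++ [g c] else r) r0,
       l.foldl (fun s c => if P c then PySem.Set.add s c else s) s0) := by
  induction l generalizing r0 s0 with
  | nil => rfl
  | cons a t ih =>
    simp only [List.foldl_cons]
    by_cases h : P a = true <;> simp [h, ih]

-- membership in the seen set A accumulates
theorem mem_foldl_add (l : List String) (P : String → Bool) (s0 : PySem.Set String) (x : String) :
    x ∈ l.foldl (fun s c => if P c then PySem.Set.add s c else s) s0 ↔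
      x ∈ s0 ∨ (x ∈ l ∧ P x = true) := by
  induction l generalizing s0 with
  | nil => simp
  | cons a t ih =>
    simp only [List.foldl_cons]
    by_cases h : P a = true <;>
      simp only [h, if_true, ih, PySem.Set.mem_add, List.mem_cons] <;>
      constructor
    · rintro (⟨hs | rfl⟩ | ⟨ht, hp⟩) <;> tauto
    · rintro (hs | ⟨(rfl | ht), hp⟩) <;> tauto
    · rintro (hs | ⟨ht, hp⟩) <;> tauto
    · rintro (hs | ⟨(rfl | ht), hp⟩) <;> tauto

theorem filter_key_nil {V : Type} (l : List (String × V)) (c : String)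
    (h : ∀ p ∈ l, p.1 ≠ c) : l.filter (fun p => p.1 == c) = [] := by
  rw [List.filter_eq_nil_iff]
  intro p hp
  simpa using h p hp

theorem filter_key_single {V : Type} (l : List (String × V)) (c : String) (v : V)
    (hnd : (l.map Prod.fst).Nodup) (hm : (c, v) ∈ l) :
    l.filter (fun p => p.1 == c) = [(c, v)] := by
  induction l with
  | nil => cases hm
  | cons a t ih =>
    simp only [List.map_cons, List.nodup_cons] at hnd
    rcases List.mem_cons.mp hm with rfl | hm
    · simp only [List.filter_cons, beq_self_eq_true, if_true]
      rw [filter_key_nil]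
      intro p hp hpc
      exact hnd.1 (hpc ▸ (List.mem_map_of_mem hp : p.1 ∈ t.map Prod.fst))
    · have ha : a.1 ≠ c := fun hc => hnd.1 (hc ▸ (List.mem_map_of_mem hm : (c, v).1 ∈ t.map Prod.fst))
      simp only [List.filter_cons, beq_iff_eq, ha, if_false]
      exact ih hnd.2 hm

-- with unique keys, filtering the items at one key is exactly the contains/getD test
theorem items_filter_key (d : PySem.Dict String (String × String)) (c : String)
    (hnd : d.keys.Nodup) :
    (d.items.filter (fun p => p.1 == c)).map Prod.snd
      = if d.contains c then [d.getD c ("", "")] else [] := by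
  by_cases h : d.contains c = true
  · have hs : (d.get? c).isSome := by rw [← PySem.Dict.contains_eq_isSome_get?]; exact h
    obtain ⟨v, hv⟩ := Option.isSome_iff_exists.mp hs
    rw [filter_key_single d.items c v hnd (PySem.Dict.mem_items_of_get?_eq_some d hv)]
    simp [h, PySem.Dict.getD_of_get?_eq_some d _ hv]
  · rw [filter_key_nil]
    · simp [h]
    · intro p hp hpc
      exact h ((PySem.Dict.contains_iff_mem_keys d c).mpr
        (hpc ▸ PySem.Dict.mem_keys_of_mem_items d hp))

-- B's bucket dict at rank r holds exactly the items whose key ranks r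
theorem buckets_getD (its : List (String × (String × String))) (r : Int) :
    (its.foldl (fun b p => b.modify (pvRank.getD p.1 8) [] (· ++ [p.2])) PySem.Dict.empty).getD r []
      = (its.filter (fun p => pvRank.getD p.1 8 == r)).map Prod.snd := by
  have h : its.foldl (fun b p => b.modify (pvRank.getD p.1 8) [] (· ++ [p.2])) PySem.Dict.empty
      = (its.map (fun p => (pvRank.getD p.1 8, p.2))).foldl
          (fun b q => b.modify q.1 [] (· ++ [q.2])) PySem.Dict.empty := by
    rw [List.foldl_map]
  rw [h, PySem.Dict.getD_foldl_modify_append, PySem.Dict.getD_empty]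
  simp [List.filter_map, Function.comp_def]

theorem rank_key0 : ∀ (p : String × (String × String)),
    (pvRank.getD p.1 8 == (0 : Int)) = (p.1 == "pallavi") := by
  intro p; rw [pvRank_getD]; split_ifs <;> simp_all

theorem rank_key1 : ∀ (p : String × (String × String)),
    (pvRank.getD p.1 8 == (1 : Int)) = (p.1 == "anupallavi") := by
  intro p; rw [pvRank_getD]; split_ifs <;> simp_all

theorem rank_key2 : ∀ (p : String × (String × String)),
    (pvRank.getD p.1 8 == (2 : Int)) = (p.1 == "charanam") := by
  intro p; rw [pvRank_getD]; split_ifs <;> simp_all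

theorem rank_key3 : ∀ (p : String × (String × String)),
    (pvRank.getD p.1 8 == (3 : Int)) = (p.1 == "samashti_charanam") := by
  intro p; rw [pvRank_getD]; split_ifs <;> simp_all

theorem rank_key4 : ∀ (p : String × (String × String)),
    (pvRank.getD p.1 8 == (4 : Int)) = (p.1 == "madhyamakala") := by
  intro p; rw [pvRank_getD]; split_ifs <;> simp_all

theorem rank_key5 : ∀ (p : String × (String × String)),
    (pvRank.getD p.1 8 == (5 : Int)) = (p.1 == "chittaswaram") := by
  intro p; rw [pvRank_getD]; split_ifs <;> simp_all

theorem rank_key6 : ∀ (p : String × (String × String)),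
    (pvRank.getD p.1 8 == (6 : Int)) = (p.1 == "swara_sahitya") := by
  intro p; rw [pvRank_getD]; split_ifs <;> simp_all

theorem rank_key7 : ∀ (p : String × (String × String)),
    (pvRank.getD p.1 8 == (7 : Int)) = (p.1 == "vilomam") := by
  intro p; rw [pvRank_getD]; split_ifs <;> simp_all

theorem rank_key8 : ∀ (p : String × (String × String)),
    (pvRank.getD p.1 8 == (8 : Int)) = !(decide (p.1 ∈ pvCanonicalOrder)) := by
  intro p; rw [pvRank_getD]; simp only [pvCanonicalOrder, List.mem_cons, List.not_mem_nil, or_false]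
  split_ifs <;> simp_all
theorem core (d : PySem.Dict String (String × String)) (hnd : d.keys.Nodup) :
    (d.items.foldl
      (fun res p => if PySem.Set.contains
          (pvCanonicalOrder.foldl
            (fun acc c => if d.contains c then
              (acc.1 ++ [d.getD c ("", "")], PySem.Set.add acc.2 c) else acc)
            ([], PySem.Set.empty)).2 p.1 then res else res ++ [p.2])
      (pvCanonicalOrder.foldl
        (fun acc c => if d.contains c then
          (acc.1 ++ [d.getD c ("", "")], PySem.Set.add acc.2 c) else acc)
        ([], PySem.Set.empty)).1)
    = (PySem.List.pyRange 0 (8 + 1) 1).foldl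
        (fun res r => res ++
          (d.items.foldl (fun b p => b.modify (pvRank.getD p.1 8) [] (· ++ [p.2]))
            PySem.Dict.empty).getD r []) [] := by
  rw [foldl_pair_split]
  have htail : d.items.foldl
      (fun res p => if PySem.Set.contains
          (pvCanonicalOrder.foldl (fun s c => if d.contains c then PySem.Set.add s c else s)
            PySem.Set.empty) p.1 then res else res ++ [p.2])
      (pvCanonicalOrder.foldl (fun r c => if d.contains c then r ++ [d.getD c ("", "")] else r) [])
      = (pvCanonicalOrder.foldl (fun r c => if d.contains c then r ++ [d.getD c ("", "")] else r) [])
        ++ (d.items.filter (fun p => !(decide (p.1 ∈ pvCanonicalOrder)))).map Prod.snd := by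
    rw [PySem.List.foldl_congr_mem _ _
      (fun res p => if (!(decide (p.1 ∈ pvCanonicalOrder))) = true then res ++ [p.2] else res) _ ?_]
    · exact PySem.List.foldl_append_if _ _ _ _
    · intro acc p hp
      have hc : d.contains p.1 = true :=
        (PySem.Dict.contains_iff_mem_keys d p.1).mpr (PySem.Dict.mem_keys_of_mem_items d hp)
      have hS : PySem.Set.contains
          (pvCanonicalOrder.foldl (fun s c => if d.contains c then PySem.Set.add s c else s)
            PySem.Set.empty) p.1 = decide (p.1 ∈ pvCanonicalOrder) := by
        simp [PySem.Set.contains, mem_foldl_add, PySem.Set.empty, hc]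
      rw [hS]
      by_cases h : p.1 ∈ pvCanonicalOrder <;> simp [h]
  rw [htail]
  have hfun : (fun (r : List (String × String)) c =>
        if d.contains c then r ++ [d.getD c ("", "")] else r)
      = (fun r c => r ++ (if d.contains c then [d.getD c ("", "")] else [])) := by
    funext r c; by_cases h : d.contains c = true <;> simp [h]
  rw [hfun]
  have hrange : PySem.List.pyRange 0 (8 + 1) 1 = [0, 1, 2, 3, 4, 5, 6, 7, 8] := by decide
  rw [hrange]
  simp only [List.foldl_cons, List.foldl_nil, buckets_getD,
    rank_key0, rank_key1, rank_key2, rank_key3, rank_key4, rank_key5, rank_key6, rank_key7,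
    rank_key8]
  rw [items_filter_key d "pallavi" hnd, items_filter_key d "anupallavi" hnd,
    items_filter_key d "charanam" hnd, items_filter_key d "samashti_charanam" hnd,
    items_filter_key d "madhyamakala" hnd, items_filter_key d "chittaswaram" hnd,
    items_filter_key d "swara_sahitya" hnd, items_filter_key d "vilomam" hnd]
  simp only [pvCanonicalOrder, List.foldl_cons, List.foldl_nil, List.nil_append,
    List.append_assoc]

theorem ordered_eq (sections : List (String × String)) :
    ordered_sections sections = ordered_sections_alt sections := by
  have hnd : (sections.foldl
      (fun d kv => d.insert (pvNormaliseSectionKey kv.1) (kv.1, kv.2))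
      PySem.Dict.empty).keys.Nodup :=
    PySem.Dict.nodup_keys_foldl_insert_key sections (fun kv => pvNormaliseSectionKey kv.1)
      (fun _ kv => (kv.1, kv.2)) PySem.Dict.empty (by simp [PySem.Dict.keys_empty])
  simpa only [ordered_sections, ordered_sections_alt] using core _ hnd

-- ===== VERDICT (by name: the statement is the Claim_ definition above) =====
theorem ordered_sections_spec : Claim_equal_ordered_sections := by
  intro sections _
  unfold Spec_ordered_sections
  exact ordered_eq sections
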